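-- pv_equiv track=rewrite | github.com/maximus3/tg_cs_comp_bot | views.py | score_time
-- ===== SOURCE A (Python) =====
-- PLACES_TO_SCORE = {
--     1: 7,
--     2: 6,
--     3: 5,
--     4: 4,
--     7: 3,
--     11: 2,
--     15: 1,
-- }
--
-- def get_places_and_results(data, reverse=True):
--     results = []
--     for command in data:
--         results.append((data[command], command))
--     results.sort(reverse=reverse)
--
--     places = {}
--     for i, res in enumerate(results):
--         places[res[1]] = i + 1
--     return places, results
--
-- def score_time(data):
--     places, results = get_places_and_results(data, False)
--     all_data = {}
--     for command in data:
--         place = places[command]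
--         while PLACES_TO_SCORE.get(place) is None:
--             place -= 1
--         all_data[command] = (places[command], PLACES_TO_SCORE.get(place), data[command])
--     return all_data
-- ===== SOURCE B (Python) =====
-- def score_time(data):
--     def score_of(rank):
--         if rank <= 4:
--             return 8 - rank
--         if rank <= 6:
--             return 4
--         if rank <= 10:
--             return 3
--         if rank <= 14:
--             return 2
--         return 1
--
--     out = {}
--     for cmd, t in data.items():
--         rank = 1
--         for cmd2, t2 in data.items():
--             if (t2, cmd2) < (t, cmd):
--                 rank += 1
--         out[cmd] = (rank, score_of(rank), t)
--     return out
-- ===== Notes on version B (the rewrite author's own statement) =====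
-- stated objective: alternative
-- what changed: B drops the sort, the places dict and the backward while-scan entirely: each command's place is computed directly as 1 + the number of strictly smaller (time, name) pairs, and its score by a closed-form arithmetic rule on the place; it trades A's sort for a quadratic counting pass.
import Mathlib
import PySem

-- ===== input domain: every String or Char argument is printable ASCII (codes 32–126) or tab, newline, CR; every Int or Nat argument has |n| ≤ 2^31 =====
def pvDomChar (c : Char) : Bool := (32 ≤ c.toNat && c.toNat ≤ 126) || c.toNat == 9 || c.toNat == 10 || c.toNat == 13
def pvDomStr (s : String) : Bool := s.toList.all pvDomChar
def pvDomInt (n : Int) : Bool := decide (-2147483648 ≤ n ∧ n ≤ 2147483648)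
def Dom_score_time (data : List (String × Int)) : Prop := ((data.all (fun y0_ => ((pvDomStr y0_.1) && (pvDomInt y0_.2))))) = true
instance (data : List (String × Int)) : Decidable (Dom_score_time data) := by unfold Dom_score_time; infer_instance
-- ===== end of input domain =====

-- B removes A's sort, places dict and backward while-scan: it counts strictly smaller
-- (time, name) pairs to get the place and turns the place into a score by arithmetic.

-- ===== PORT A =====
def PLACES_TO_SCORE : PySem.Dict Int Int :=
  PySem.Dict.ofList [(1, 7), (2, 6), (3, 5), (4, 4), (7, 3), (11, 2), (15, 1)]

def get_places_and_results (data : List (String × Int)) (reverse : Bool) :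
    PySem.Dict String Int × List (Int × String) :=
  let d := PySem.Dict.ofList data
  let results := d.keys.foldl (fun acc command => acc ++ [((d.get? command).getD 0, command)]) []
  let results := PySem.List.sorted2 results (fun r => r.1) (fun r => r.2) reverse
  let places := (PySem.List.enumerate results).foldl
    (fun ps p => ps.insert p.2.2 (p.1 + 1)) PySem.Dict.empty
  (places, results)

-- Python's 'while PLACES_TO_SCORE.get(place) is None: place -= 1', run with fuel place.toNat
-- (sufficient fuel: in score_time the loop starts at a rank ≥ 1 and stops at key 1 at the latest)
def scoreWhile : Nat → Int → Int
  | 0, place => place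
  | fuel + 1, place =>
      if (PLACES_TO_SCORE.get? place).isNone then scoreWhile fuel (place - 1) else place

def score_time (data : List (String × Int)) : List (String × Int × Int × Int) :=
  let d := PySem.Dict.ofList data
  let places := (get_places_and_results data false).1
  let all_data := d.keys.foldl (fun ad command =>
      let place0 := (places.get? command).getD 0
      let place := scoreWhile place0.toNat place0
      ad.insert command
        ((places.get? command).getD 0, (PLACES_TO_SCORE.get? place).getD 0, (d.get? command).getD 0))
    PySem.Dict.empty
  all_data.items

-- ===== PORT B =====
def scoreOf (r : Int) : Int :=
  if r ≤ 4 then 8 - r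
  else if r ≤ 6 then 4
  else if r ≤ 10 then 3
  else if r ≤ 14 then 2
  else 1

def score_time_alt (data : List (String × Int)) : List (String × Int × Int × Int) :=
  let d := PySem.Dict.ofList data
  (d.items.foldl (fun out kv =>
      let rank := d.items.foldl (fun acc kv2 =>
          if kv2.2 < kv.2 ∨ (kv2.2 = kv.2 ∧ kv2.1 < kv.1) then acc + 1 else acc) (1 : Int)
      out.insert kv.1 (rank, scoreOf rank, kv.2)) PySem.Dict.empty).items

-- ===== PRECONDITION & SPEC =====
def Spec_score_time (data : List (String × Int)) (out : List (String × Int × Int × Int)) : Prop := out = score_time_alt data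
instance (data : List (String × Int)) (out : List (String × Int × Int × Int)) : Decidable (Spec_score_time data out) := by unfold Spec_score_time; infer_instance

-- ===== CLAIM (what is proved, stated in full; the proofs are below) =====
def Claim_equal_score_time : Prop := ∀ (data : List (String × Int)), Dom_score_time data → Spec_score_time data (score_time data)

-- ===== LEMMAS AND PROOFS =====

-- the comparator sorted2 (.2, .1, reverse=false) uses on A's sorted list, seen on (name, time) pairs
def pvLexlt (a b : String × Int) : Bool :=
  decide (a.2 < b.2) || (!decide (b.2 < a.2) && decide (a.1 < b.1))

theorem pvLexlt_irrefl (a : String × Int) : pvLexlt a a = false := by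
  simp [pvLexlt]

theorem pvLexlt_iff (a b : String × Int) :
    pvLexlt a b = true ↔ a.2 < b.2 ∨ (¬ b.2 < a.2 ∧ a.1 < b.1) := by
  simp [pvLexlt]

theorem pvLexlt_asymm {a b : String × Int} (h : pvLexlt a b = true) : pvLexlt b a = false := by
  rw [Bool.eq_false_iff]
  intro h2
  rw [pvLexlt_iff] at h h2
  rcases h with h | ⟨h1, h2'⟩ <;> rcases h2 with g | ⟨g1, g2⟩
  · omega
  · omega
  · omega
  · exact absurd h2' (not_lt.mpr (le_of_lt g2))

theorem pvLexlt_total {a b : String × Int} (hne : a.1 ≠ b.1) (h : pvLexlt a b = false) :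
    pvLexlt b a = true := by
  rw [Bool.eq_false_iff] at h
  rw [ne_eq, pvLexlt_iff] at h
  rw [pvLexlt_iff]
  by_contra h2
  push Not at h2
  apply h
  rcases h2 with ⟨g1, g2⟩
  rcases lt_trichotomy a.2 b.2 with ht | ht | ht
  · exact Or.inl ht
  · refine Or.inr ⟨by omega, ?_⟩
    have := g2 (by omega)
    rcases lt_trichotomy a.1 b.1 with hs | hs | hs
    · exact hs
    · exact absurd hs hne
    · exact absurd hs this
  · omega

theorem pvLexlt_trans {a b c : String × Int} (h1 : pvLexlt a b = true) (h2 : pvLexlt b c = true) :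
    pvLexlt a c = true := by
  rw [pvLexlt_iff] at h1 h2 ⊢
  rcases h1 with h1 | ⟨h1a, h1b⟩ <;> rcases h2 with h2 | ⟨h2a, h2b⟩
  · exact Or.inl (by omega)
  · exact Or.inl (by omega)
  · exact Or.inl (by omega)
  · exact Or.inr ⟨by omega, lt_trans h1b h2b⟩

theorem perm_insertBy {α : Type} (before : α → α → Bool) (x : α) (l : List α) :
    (PySem.List.insertBy before x l).Perm (x :: l) := by
  induction l with
  | nil => simp [PySem.List.insertBy]
  | cons y ys ih =>
      simp only [PySem.List.insertBy]
      by_cases hb : before x y = true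
      · simp [hb]
      · simp only [hb]
        exact ((ih.cons y).trans (List.Perm.swap x y ys))

theorem pairwise_insertBy {x : String × Int} {l : List (String × Int)}
    (hnd : ∀ y ∈ l, x.1 ≠ y.1) (hp : l.Pairwise (fun a b => pvLexlt a b = true)) :
    (PySem.List.insertBy pvLexlt x l).Pairwise (fun a b => pvLexlt a b = true) := by
  induction l with
  | nil => simp [PySem.List.insertBy]
  | cons y ys ih =>
      simp only [PySem.List.insertBy]
      rcases List.pairwise_cons.mp hp with ⟨hy, hys⟩
      by_cases hb : pvLexlt x y = true
      · simp only [hb, if_true]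
        refine List.pairwise_cons.mpr ⟨?_, hp⟩
        intro z hz
        rcases List.mem_cons.mp hz with rfl | hz
        · exact hb
        · exact pvLexlt_trans hb (hy z hz)
      · simp only [hb]
        refine List.pairwise_cons.mpr ⟨?_, ih (fun z hz => hnd z (List.mem_cons_of_mem y hz)) hys⟩
        intro z hz
        rcases (PySem.List.mem_insertBy pvLexlt x z ys).mp hz with rfl | hz
        · exact pvLexlt_total (hnd y List.mem_cons_self) (Bool.eq_false_iff.mpr hb)
        · exact hy z hz

theorem pairwise_foldl_insertBy (xs : List (String × Int)) (acc : List (String × Int))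
    (hnd : ((acc ++ xs).map Prod.fst).Nodup)
    (hp : acc.Pairwise (fun a b => pvLexlt a b = true)) :
    (xs.foldl (fun acc x => PySem.List.insertBy pvLexlt x acc) acc).Pairwise
      (fun a b => pvLexlt a b = true) := by
  induction xs generalizing acc with
  | nil => simpa using hp
  | cons x xs ih =>
      simp only [List.foldl_cons]
      have hperm : (PySem.List.insertBy pvLexlt x acc).Perm (x :: acc) :=
        perm_insertBy pvLexlt x acc
      apply ih
      · have hperm2 : ((PySem.List.insertBy pvLexlt x acc ++ xs).map Prod.fst).Perm
            ((acc ++ x :: xs).map Prod.fst) :=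
          List.Perm.map _ ((hperm.append_right xs).trans List.perm_middle.symm)
        exact hperm2.nodup_iff.mpr hnd
      · apply pairwise_insertBy
        · intro y hy hxy
          rw [List.map_append, List.nodup_append] at hnd
          exact hnd.2.2 y.1 (List.mem_map.mpr ⟨y, hy, rfl⟩) x.1 (by simp) hxy.symm
        · exact hp

theorem countP_lt_of_pairwise (l : List (String × Int)) (k : Nat) (hk : k < l.length)
    (hp : l.Pairwise (fun a b => pvLexlt a b = true)) :
    l.countP (fun q => pvLexlt q l[k]) = k := by
  have hpg := List.pairwise_iff_getElem.mp hp
  obtain ⟨x, hx⟩ : ∃ x, l[k] = x := ⟨_, rfl⟩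
  rw [hx]
  conv_lhs => rw [(List.take_append_drop k l).symm]
  rw [List.countP_append]
  have h1 : (l.take k).countP (fun q => pvLexlt q x) = k := by
    rw [List.countP_eq_length.mpr, List.length_take]
    · omega
    · intro a ha
      obtain ⟨j, hj, rfl⟩ := List.mem_iff_getElem.mp ha
      rw [List.getElem_take, ← hx]
      rw [List.length_take] at hj
      exact hpg j k (by omega) hk (by omega)
  have h2 : (l.drop k).countP (fun q => pvLexlt q x) = 0 := by
    rw [List.countP_eq_zero]
    intro a ha
    obtain ⟨j, hj, rfl⟩ := List.mem_iff_getElem.mp ha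
    rw [List.getElem_drop, ← hx]
    rcases Nat.eq_zero_or_pos j with rfl | hjpos
    · simpa using pvLexlt_irrefl l[k]
    · have := hpg k (k + j) hk (by simp [List.length_drop] at hj; omega) (by omega)
      simpa using pvLexlt_asymm this
  omega

-- the swap that relates A's (time, command) tuples to B's (command, time) dict items
def pvSwap (p : String × Int) : Int × String := (p.2, p.1)

theorem insertBy_map_pvSwap (before : (Int × String) → (Int × String) → Bool)
    (before' : (String × Int) → (String × Int) → Bool)
    (h : ∀ a b, before (pvSwap a) (pvSwap b) = before' a b)
    (x : String × Int) (l : List (String × Int)) :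
    PySem.List.insertBy before (pvSwap x) (l.map pvSwap)
      = (PySem.List.insertBy before' x l).map pvSwap := by
  induction l with
  | nil => simp [PySem.List.insertBy]
  | cons y ys ih =>
      simp only [List.map_cons, PySem.List.insertBy, h]
      by_cases hb : before' x y = true
      · simp [hb]
      · simp [hb, ih]

theorem sorted2_map_pvSwap (l : List (String × Int)) :
    PySem.List.sorted2 (l.map pvSwap) (fun r => r.1) (fun r => r.2) false
      = (PySem.List.sorted2 l (fun kv => kv.2) (fun kv => kv.1) false).map pvSwap := by
  simp only [PySem.List.sorted2, if_neg (by decide : ¬ (false = true))]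
  rw [List.foldl_map]
  have key : ∀ (acc : List (String × Int)),
      List.foldl (fun acc x => PySem.List.insertBy
          (fun a b => decide (a.1 < b.1) || !decide (b.1 < a.1) && decide (a.2 < b.2)) (pvSwap x) acc)
        (acc.map pvSwap) l
      = (List.foldl (fun acc x => PySem.List.insertBy
          (fun a b => decide (a.2 < b.2) || !decide (b.2 < a.2) && decide (a.1 < b.1)) x acc) acc l).map pvSwap := by
    induction l with
    | nil => intro acc; simp
    | cons y ys ih =>
        intro acc
        simp only [List.foldl_cons]
        rw [insertBy_map_pvSwap
              (fun a b => decide (a.1 < b.1) || !decide (b.1 < a.1) && decide (a.2 < b.2))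
              (fun a b => decide (a.2 < b.2) || !decide (b.2 < a.2) && decide (a.1 < b.1))
              (fun a b => rfl) y acc, ih]
  exact key []

theorem sorted2_eq_foldl (l : List (String × Int)) :
    PySem.List.sorted2 l (fun kv => kv.2) (fun kv => kv.1) false
      = l.foldl (fun acc x => PySem.List.insertBy pvLexlt x acc) [] := rfl

theorem places_keys_none_of_gt15 (p : Int) (hp : 15 < p) : PLACES_TO_SCORE.get? p = none := by
  rw [PySem.Dict.get?_eq_none_iff_not_mem_keys]
  have hk : PLACES_TO_SCORE.keys = [1, 2, 3, 4, 7, 11, 15] := by decide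
  rw [hk]; simp; omega

theorem scoreWhile_ge15 (k : Nat) : scoreWhile (15 + k) (15 + (k : Int)) = 15 := by
  induction k with
  | zero => decide
  | succ n ih =>
      have h1 : 15 + (n + 1) = (15 + n) + 1 := by omega
      rw [h1, scoreWhile]
      have h2 : PLACES_TO_SCORE.get? (15 + ((n + 1 : Nat) : Int)) = none :=
        places_keys_none_of_gt15 _ (by push_cast; omega)
      rw [h2]
      simp only [Option.isNone_none, if_true]
      have h3 : 15 + ((n + 1 : Nat) : Int) - 1 = 15 + (n : Int) := by push_cast; omega
      rw [h3, ih]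

-- A's backward while-scan from rank p lands on the score B computes arithmetically
theorem score_agree (p : Int) (hp : 1 ≤ p) :
    (PLACES_TO_SCORE.get? (scoreWhile p.toNat p)).getD 0 = scoreOf p := by
  by_cases h : p ≤ 15
  · interval_cases p <;> decide
  · obtain ⟨k, rfl⟩ : ∃ k : Nat, p = 15 + (k : Int) := ⟨(p - 15).toNat, by omega⟩
    have ht : (15 + (k : Int)).toNat = 15 + k := by omega
    rw [ht, scoreWhile_ge15]
    have hk0 : 0 < k := by omega
    have : scoreOf (15 + (k : Int)) = 1 := by
      unfold scoreOf
      rw [if_neg (by omega), if_neg (by omega), if_neg (by omega), if_neg (by omega)]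
    rw [this]; decide

theorem enumerate_map {α β : Type} (f : α → β) (l : List α) (s : Int) :
    PySem.List.enumerate (l.map f) s = (PySem.List.enumerate l s).map (fun p => (p.1, f p.2)) := by
  induction l generalizing s with
  | nil => simp [PySem.List.enumerate_nil]
  | cons x xs ih => simp [PySem.List.enumerate_cons, ih]

-- ===== VERDICT (by name: the statement is the Claim_ definition above) =====
theorem score_time_spec : Claim_equal_score_time := by
  intro data _
  unfold Spec_score_time score_time score_time_alt get_places_and_results
  dsimp only
  set d := PySem.Dict.ofList data with hd
  have hnd : d.keys.Nodup := PySem.Dict.nodup_keys_ofList data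
  have hkeys : d.keys = d.items.map (fun p => p.1) := rfl
  set ordered := PySem.List.sorted2 d.items (fun kv => kv.2) (fun kv => kv.1) false with hord
  have hperm : ordered.Perm d.items := PySem.List.sorted2_perm _ _ _ _
  have hpermk : (ordered.map (fun p => p.1)).Perm d.keys := by
    rw [hkeys]; exact hperm.map _
  have hndo : (ordered.map (fun p => p.1)).Nodup := hpermk.nodup_iff.mpr hnd
  have hpw : ordered.Pairwise (fun a b => pvLexlt a b = true) := by
    rw [hord, sorted2_eq_foldl]
    exact pairwise_foldl_insertBy d.items [] (by simpa [hkeys] using hnd) (by simp)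
  -- A's results list is the swapped items, so its sort is the swapped ordered list
  have hres : d.keys.foldl (fun acc command => acc ++ [((d.get? command).getD 0, command)]) []
      = d.items.map pvSwap := by
    rw [PySem.List.foldl_append_singleton_eq_map, List.nil_append, hkeys, List.map_map]
    refine List.map_congr_left ?_
    intro p hp
    have : d.get? p.1 = some p.2 := PySem.Dict.get?_of_mem_items d hp hnd
    simp [pvSwap, this]
  rw [hres, sorted2_map_pvSwap, ← hord, enumerate_map, List.foldl_map]
  simp only [pvSwap]
  -- A's rank dict, built over the enumerated sorted list
  set places := (PySem.List.enumerate ordered 0).foldl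
      (fun ps q => ps.insert q.2.1 (q.1 + 1)) PySem.Dict.empty with hplaces
  have hennd : ((PySem.List.enumerate ordered 0).map (fun q => q.2.1)).Nodup := by
    rw [show (fun (q : Int × String × Int) => q.2.1)
          = (fun (p : String × Int) => p.1) ∘ (fun (q : Int × String × Int) => q.2) from rfl,
        ← List.map_map, PySem.List.map_snd_enumerate]
    exact hndo
  have hplitems : places.items
      = (PySem.List.enumerate ordered 0).map (fun q => (q.2.1, q.1 + 1)) := by
    rw [hplaces]
    rw [PySem.Dict.items_foldl_insert_fresh _ _ _ _ (fun a _ => PySem.Dict.contains_empty _) hennd]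
    rfl
  have hplnd : places.keys.Nodup := by
    have : places.keys = places.items.map (fun p => p.1) := rfl
    rw [this, hplitems, List.map_map]; exact hennd
  -- both result dicts are built over fresh distinct keys: compare the mapped lists pointwise
  rw [PySem.Dict.items_foldl_insert_fresh _ (fun c => c) _ _
        (fun a _ => PySem.Dict.contains_empty _) (by simpa using hnd)]
  have hB := PySem.Dict.items_foldl_insert_fresh d.items (fun kv : String × Int => kv.1)
      (fun kv : String × Int =>
        (List.foldl (fun acc kv2 =>
            if kv2.2 < kv.2 ∨ (kv2.2 = kv.2 ∧ kv2.1 < kv.1) then acc + 1 else acc) (1 : Int) d.items,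
          scoreOf (List.foldl (fun acc kv2 =>
            if kv2.2 < kv.2 ∨ (kv2.2 = kv.2 ∧ kv2.1 < kv.1) then acc + 1 else acc) (1 : Int) d.items),
          kv.2))
      PySem.Dict.empty
      (fun a _ => PySem.Dict.contains_empty _) (by simpa [hkeys] using hnd)
  rw [hB]
  rw [hkeys, List.map_map]
  refine congrArg (PySem.Dict.empty.items ++ ·) (List.map_congr_left ?_)
  intro kv hkv
  dsimp only [Function.comp]
  obtain ⟨c, t⟩ := kv
  -- locate (c, t) in the sorted order
  have hmemo : (c, t) ∈ ordered := hperm.mem_iff.mpr hkv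
  obtain ⟨k, hk, hkp⟩ := List.getElem_of_mem hmemo
  have hq : ((k : Int), (c, t)) ∈ PySem.List.enumerate ordered 0 := by
    rw [PySem.List.mem_enumerate_iff]
    exact ⟨k, hk, by rw [hkp]; simp⟩
  have hpl : places.get? c = some ((k : Int) + 1) := by
    apply PySem.Dict.get?_of_mem_items _ _ hplnd
    rw [hplitems]
    exact List.mem_map.mpr ⟨((k : Int), (c, t)), hq, rfl⟩
  have hdc : d.get? c = some t := PySem.Dict.get?_of_mem_items d hkv hnd
  -- B's counted rank is A's place
  have hcnt : d.items.foldl (fun acc kv2 =>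
      if kv2.2 < t ∨ (kv2.2 = t ∧ kv2.1 < c) then acc + 1 else acc) (1 : Int)
      = (k : Int) + 1 := by
    rw [PySem.List.foldl_ite_add_one]
    have hcp : ∀ q : String × Int,
        (decide (q.2 < t ∨ (q.2 = t ∧ q.1 < c))) = pvLexlt q (c, t) := by
      intro q
      simp only [pvLexlt]
      by_cases h1 : q.2 < t
      · simp [h1]
      · by_cases h2 : q.2 = t
        · subst h2; simp
        · have h3 : t < q.2 := by omega
          simp [h1, h2, h3]
    have : d.items.countP (fun q => decide (q.2 < t ∨ (q.2 = t ∧ q.1 < c)))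
        = ordered.countP (fun q => pvLexlt q (c, t)) := by
      rw [List.countP_congr (fun q _ => by rw [hcp q])]
      exact (hperm.countP_eq _).symm
    rw [this, show ((c, t) : String × Int) = ordered[k] from hkp.symm,
        countP_lt_of_pairwise ordered k hk hpw]
    omega
  simp only [hpl, hdc, Option.getD_some, hcnt]
  have hsc := score_agree ((k : Int) + 1) (by omega)
  rw [hsc]
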